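-- pv_equiv track=rewrite | github.com/daniel880423/Member_System | file/hw2/1090316/s1090316_0.py | homework_2
-- ===== SOURCE A (Python) =====
-- def homework_2(lst): # 請同學記得把檔案名稱改成自己的學號(ex.1104813.py)
--     min_time=0                        # 最小步數初始值設為0
--     if (lst[0] % 2)!=0:               # 第一個index的值無法被2整除的話代表為奇數
--         min_time+=1                   # 因此步數+1
--         lst[0]+=1                     # 第一個值也+1
--     else:                             # 如果是偶數則跳出迴圈
--         pass
--
--     for i in range(1,len(lst)):
--         if ( lst[i] % 2 )== 0:        #偶數
--             while lst[i]<=lst[i-1]:   #如果比前一個數還小就一直累計步數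
--                 min_time+=2           #因為這邊為偶數所以+2還是偶數
--                 lst[i]+=2
--
--         else:                         #奇數
--             min_time+=1
--             lst[i]+=1
--             while lst[i]<=lst[i-1]:   #如果比前一個數還小就一直累計步數
--                 min_time+=2           #因為這邊為奇數所以+1才會變偶數
--                 lst[i]+=2
--
--     return min_time
-- ===== SOURCE B (Python) =====
-- def homework_2(lst):
--     total = 0
--     prev = None
--     for x in lst:
--         r = x % 2
--         cur = x + r
--         total += r
--         if prev is not None and cur <= prev:
--             k = (prev - cur) // 2 + 1  # closed-form count of +2 increments
--             total += 2 * k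
--             cur += 2 * k
--         prev = cur
--     return total
-- ===== Notes on version B (the rewrite author's own statement) =====
-- stated objective: faster
-- what changed: Each per-element while-loop of +2 increments is replaced by a closed-form count k = (prev-cur)//2 + 1 in a single pass, removing the value-dependent inner loop.
import Mathlib
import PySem

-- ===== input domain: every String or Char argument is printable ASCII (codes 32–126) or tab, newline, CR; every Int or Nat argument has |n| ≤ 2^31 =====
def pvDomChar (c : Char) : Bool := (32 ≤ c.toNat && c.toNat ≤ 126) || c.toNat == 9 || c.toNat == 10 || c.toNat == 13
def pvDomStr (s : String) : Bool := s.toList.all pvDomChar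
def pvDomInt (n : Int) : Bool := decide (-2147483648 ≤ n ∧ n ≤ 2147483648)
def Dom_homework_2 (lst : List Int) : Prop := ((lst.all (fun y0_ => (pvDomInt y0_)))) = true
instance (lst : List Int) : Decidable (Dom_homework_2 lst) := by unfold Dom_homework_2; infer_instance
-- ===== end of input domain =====

-- B replaces each value-dependent while-loop of +2 increments by a closed-form count (O(n));
-- equivalence is about the RETURN value only: A mutates lst in place, B does not.

-- ===== PORT A =====
-- the inner 'while lst[i] <= lst[i-1]: min_time += 2; lst[i] += 2' loop, returning (lst[i], min_time)
def pvWhileA (cur prev acc : Int) : Int × Int :=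
  if cur ≤ prev then pvWhileA (cur + 2) prev (acc + 2) else (cur, acc)
termination_by (prev + 1 - cur).toNat
decreasing_by omega

-- the 'for i in range(1, len(lst))' loop; the only read of the mutated list is lst[i-1],
-- carried here as 'prev' (the value written at the previous index)
def pvLoopA : List Int → Int → Int → Int
  | [], _, mt => mt
  | y :: ys, prev, mt =>
    if PySem.Int.mod y 2 == 0 then
      let r := pvWhileA y prev mt
      pvLoopA ys r.1 r.2
    else
      let r := pvWhileA (y + 1) prev (mt + 1)
      pvLoopA ys r.1 r.2

def homework_2 (lst : List Int) : Int :=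
  match lst with
  | [] => 0   -- Python raises IndexError here; excluded by Pre_homework_2
  | x :: rest =>
    if PySem.Int.mod x 2 ≠ 0 then pvLoopA rest (x + 1) 1
    else pvLoopA rest x 0

-- ===== PORT B =====
def pvStepB (st : Option Int × Int) (x : Int) : Option Int × Int :=
  let r := PySem.Int.mod x 2
  let cur := x + r
  let total := st.2 + r
  match st.1 with
  | some prev =>
    if cur ≤ prev then
      let k := PySem.Int.floordiv (prev - cur) 2 + 1
      (some (cur + 2 * k), total + 2 * k)
    else (some cur, total)
  | none => (some cur, total)

def homework_2_alt (lst : List Int) : Int :=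
  (lst.foldl pvStepB (none, 0)).2

-- ===== PRECONDITION & SPEC =====
-- A indexes the first element unconditionally, so it raises IndexError on the empty list.
def Pre_homework_2 (lst : List Int) : Prop := lst ≠ []
instance (lst : List Int) : Decidable (Pre_homework_2 lst) := by unfold Pre_homework_2; infer_instance
def pvWitness_homework_2 : List Int := [3, 2, 7]

def Spec_homework_2 (lst : List Int) (out : Int) : Prop := out = homework_2_alt lst
instance (lst : List Int) (out : Int) : Decidable (Spec_homework_2 lst out) := by unfold Spec_homework_2; infer_instance

-- ===== CLAIM (what is proved, stated in full; the proofs are below) =====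
def Claim_equal_homework_2 : Prop := ∀ (lst : List Int), Dom_homework_2 lst → Pre_homework_2 lst → Spec_homework_2 lst (homework_2 lst)

-- ===== LEMMAS AND PROOFS =====

-- the while-loop computes the closed form
lemma pvWhileA_eq (cur prev acc : Int) :
    pvWhileA cur prev acc =
      if cur ≤ prev then
        (cur + 2 * (PySem.Int.floordiv (prev - cur) 2 + 1),
         acc + 2 * (PySem.Int.floordiv (prev - cur) 2 + 1))
      else (cur, acc) := by
  induction cur, acc using pvWhileA.induct prev with
  | case1 cur acc h ih =>
      rw [pvWhileA, if_pos h, ih, PySem.Int.floordiv_eq_ediv_of_pos (by omega),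
        PySem.Int.floordiv_eq_ediv_of_pos (by omega), if_pos h]
      split_ifs with h2
      · exact Prod.ext (by dsimp; omega) (by dsimp; omega)
      · exact Prod.ext (by dsimp; omega) (by dsimp; omega)
  | case2 cur acc h =>
      rw [pvWhileA, if_neg h, if_neg h]

-- B's closed-form step computes exactly what A's inner loop leaves in (lst[i], min_time)
lemma pvStepB_eq (y prev mt : Int) :
    pvStepB (some prev, mt) y =
      if PySem.Int.mod y 2 == 0 then
        (some (pvWhileA y prev mt).1, (pvWhileA y prev mt).2)
      else
        (some (pvWhileA (y + 1) prev (mt + 1)).1, (pvWhileA (y + 1) prev (mt + 1)).2) := by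
  rcases PySem.Int.mod_two_eq y with h | h <;>
    simp only [pvStepB, h, pvWhileA_eq, add_zero, beq_iff_eq, if_pos, one_ne_zero,
      if_false] <;>
    split_ifs <;> rfl

lemma pvLoopA_eq (ys : List Int) (prev mt : Int) :
    pvLoopA ys prev mt = (ys.foldl pvStepB (some prev, mt)).2 := by
  induction ys generalizing prev mt with
  | nil => rfl
  | cons y ys ih =>
      rw [List.foldl_cons, pvStepB_eq, pvLoopA]
      split_ifs with h <;> exact ih _ _

theorem homework_2_spec : Claim_equal_homework_2 := by
  intro lst _ hpre
  rcases lst with _ | ⟨x, rest⟩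
  · exact absurd rfl hpre
  · simp only [Spec_homework_2, homework_2, homework_2_alt]
    rcases PySem.Int.mod_two_eq x with h | h
    · have h' : x % 2 = 0 := by
        rw [← PySem.Int.mod_eq_emod_of_pos (by omega : (0:Int) < 2)]; exact h
      rw [if_neg (not_not_intro h), pvLoopA_eq, List.foldl_cons]
      simp [pvStepB, h']
    · have h' : x % 2 = 1 := by
        rw [← PySem.Int.mod_eq_emod_of_pos (by omega : (0:Int) < 2)]; exact h
      rw [if_pos (by rw [h]; decide), pvLoopA_eq, List.foldl_cons]
      simp [pvStepB, h']
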